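-- pv_equiv track=rewrite | github.com/fernandofsilva/Ericsson | GSM/GSM_TDM_Functions.py | Dev1
-- ===== SOURCE A (Python) =====
-- def Dev1(dev_ini_list, numdev_list):
--     """
--     Argument:
--     List -- List of dev_init and Numdev
--
--     Returns:
--     List -- Ajusted dev1 list
--     """
--
--     dcp_list = []
--
--     for index, dev1 in enumerate(dev_ini_list):
--         if index == 0:
--             dcp_list.append(dev1 + 1)
--         elif index == 1:
--             dcp_list.append(numdev_list[0]
--                             + dev_ini_list[index]
--                             + 1)
--         elif index == 2:
--             dcp_list.append(numdev_list[0]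
--                             + numdev_list[1]
--                             + dev_ini_list[index]
--                             + 1)
--
--     return dcp_list
-- ===== SOURCE B (Python) =====
-- def Dev1(dev_ini_list, numdev_list):
--     """One pass with a running prefix-sum accumulator; stops after the first three elements."""
--     dcp_list = []
--     running = 0
--     for index, dev in enumerate(dev_ini_list):
--         if index >= 3:
--             break
--         if index > 0:
--             running += numdev_list[index - 1]
--         dcp_list.append(running + dev + 1)
--     return dcp_list
-- ===== Notes on version B (the rewrite author's own statement) =====
-- stated objective: simpler
-- what changed: Replaces the three index-specific branches that each re-sum the numdev prefix from scratch with a single running-accumulator pass that breaks out of the loop after the first three elements.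
import Mathlib
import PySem

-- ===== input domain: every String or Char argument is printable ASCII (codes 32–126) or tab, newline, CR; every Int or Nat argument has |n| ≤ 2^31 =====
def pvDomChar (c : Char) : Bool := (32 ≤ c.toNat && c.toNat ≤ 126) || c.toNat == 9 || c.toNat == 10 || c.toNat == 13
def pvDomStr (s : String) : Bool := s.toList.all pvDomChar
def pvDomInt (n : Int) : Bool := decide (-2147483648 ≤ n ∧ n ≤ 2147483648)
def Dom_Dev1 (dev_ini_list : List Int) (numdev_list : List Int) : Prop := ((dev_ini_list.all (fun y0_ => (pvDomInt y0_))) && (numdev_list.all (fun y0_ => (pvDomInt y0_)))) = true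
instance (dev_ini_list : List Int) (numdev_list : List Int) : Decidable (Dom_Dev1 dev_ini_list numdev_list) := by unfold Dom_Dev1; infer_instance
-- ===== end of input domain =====

-- B replaces A's three branch-specific prefix re-summations with one running accumulator and an early break; return value only, no speed claim.

-- ===== PORT A =====
-- literal transliteration: for-loop over enumerate with the three index branches, appending to dcp_list
def Dev1Step (dev_ini_list : List Int) (numdev_list : List Int)
    (dcp_list : List Int) (p : Int × Int) : List Int :=
  let index := p.1
  let dev1 := p.2
  if index = 0 then
    dcp_list ++ [dev1 + 1]
  else if index = 1 then
    dcp_list ++ [PySem.List.pyGetD numdev_list 0 0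
                 + PySem.List.pyGetD dev_ini_list index 0
                 + 1]
  else if index = 2 then
    dcp_list ++ [PySem.List.pyGetD numdev_list 0 0
                 + PySem.List.pyGetD numdev_list 1 0
                 + PySem.List.pyGetD dev_ini_list index 0
                 + 1]
  else dcp_list

def Dev1 (dev_ini_list : List Int) (numdev_list : List Int) : List Int :=
  (PySem.List.enumerate dev_ini_list).foldl (Dev1Step dev_ini_list numdev_list) []

-- ===== PORT B =====
-- B's loop with break: recursion over the enumerated list carrying the running accumulator
def Dev1AltGo (numdev_list : List Int) : List (Int × Int) → Int → List Int
  | [], _ => []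
  | (index, dev) :: rest, running =>
    if index ≥ 3 then []
    else
      let running' := if index > 0 then running + PySem.List.pyGetD numdev_list (index - 1) 0 else running
      (running' + dev + 1) :: Dev1AltGo numdev_list rest running'

def Dev1_alt (dev_ini_list : List Int) (numdev_list : List Int) : List Int :=
  Dev1AltGo numdev_list (PySem.List.enumerate dev_ini_list) 0

-- ===== PRECONDITION & SPEC =====
-- Pre_ excludes exactly the inputs where the Python A raises IndexError reading numdev_list[0]/numdev_list[1] (B raises there too).
def Pre_Dev1 (dev_ini_list : List Int) (numdev_list : List Int) : Prop :=
  (2 ≤ dev_ini_list.length → 1 ≤ numdev_list.length) ∧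
  (3 ≤ dev_ini_list.length → 2 ≤ numdev_list.length)
instance (dev_ini_list : List Int) (numdev_list : List Int) : Decidable (Pre_Dev1 dev_ini_list numdev_list) := by unfold Pre_Dev1; infer_instance
def pvWitness_Dev1 : List Int × List Int := ([4, 7, 2, 9], [3, 5])

def Spec_Dev1 (dev_ini_list : List Int) (numdev_list : List Int) (out : List Int) : Prop := out = Dev1_alt dev_ini_list numdev_list
instance (dev_ini_list : List Int) (numdev_list : List Int) (out : List Int) : Decidable (Spec_Dev1 dev_ini_list numdev_list out) := by unfold Spec_Dev1; infer_instance

-- ===== CLAIM (what is proved, stated in full; the proofs are below) =====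
def Claim_equal_Dev1 : Prop := ∀ (dev_ini_list : List Int) (numdev_list : List Int), Dom_Dev1 dev_ini_list numdev_list → Pre_Dev1 dev_ini_list numdev_list → Spec_Dev1 dev_ini_list numdev_list (Dev1 dev_ini_list numdev_list)

-- ===== LEMMAS AND PROOFS =====

-- A's fold does nothing on enumerated tail elements whose index is ≥ 3
theorem devA_tail (dev_ini_list numdev_list : List Int) (l : List Int) (s : Int) (hs : 3 ≤ s)
    (dcp : List Int) :
    (PySem.List.enumerate l s).foldl (Dev1Step dev_ini_list numdev_list) dcp = dcp := by
  induction l generalizing s dcp with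
  | nil => simp [PySem.List.enumerate_nil]
  | cons x xs ih =>
    rw [PySem.List.enumerate_cons]
    simp only [List.foldl_cons]
    have h : Dev1Step dev_ini_list numdev_list dcp (s, x) = dcp := by
      unfold Dev1Step
      have h0 : ¬ (s = 0) := by omega
      have h1 : ¬ (s = 1) := by omega
      have h2 : ¬ (s = 2) := by omega
      simp [h0, h1, h2]
    rw [h]
    exact ih (s + 1) (by omega) dcp

theorem devB_tail (numdev_list : List Int) (l : List Int) (r : Int) :
    Dev1AltGo numdev_list (PySem.List.enumerate l 3) r = [] := by
  cases l with
  | nil => simp [PySem.List.enumerate_nil, Dev1AltGo]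
  | cons x xs =>
    rw [PySem.List.enumerate_cons]
    simp [Dev1AltGo]

-- ===== VERDICT (by name: the statement is the Claim_ definition above) =====
theorem Dev1_spec : Claim_equal_Dev1 := by
  unfold Claim_equal_Dev1
  intro dev numdev _ hpre
  unfold Spec_Dev1
  match dev with
  | [] => rfl
  | [a] =>
    simp [Dev1, Dev1Step, Dev1_alt, Dev1AltGo, PySem.List.enumerate_cons, PySem.List.enumerate_nil]
  | [a, b] =>
    obtain ⟨h1, _⟩ := hpre
    cases numdev with
    | nil => simp at h1
    | cons n0 nr =>
      simp [PySem.List.pyGetD_ofNat', Dev1, Dev1Step, Dev1_alt, Dev1AltGo,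
            PySem.List.enumerate_cons, PySem.List.enumerate_nil]
  | a :: b :: c :: rest =>
    obtain ⟨_, h2⟩ := hpre
    cases numdev with
    | nil => simp at h2
    | cons n0 nr =>
      cases nr with
      | nil => simp at h2
      | cons n1 nr =>
        unfold Dev1 Dev1_alt
        rw [PySem.List.enumerate_cons, PySem.List.enumerate_cons, PySem.List.enumerate_cons]
        simp only [List.foldl_cons]
        rw [devA_tail (a :: b :: c :: rest) (n0 :: n1 :: nr) rest (0 + 1 + 1 + 1) (by omega)]
        norm_num [Dev1Step, Dev1AltGo, PySem.List.pyGetD_ofNat']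
        exact devB_tail (n0 :: n1 :: nr) rest (n0 + n1)
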